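-- pv_equiv track=rewrite | github.com/stanfordnlp/pdf-struct | pdf_struct/loader/hocr.py | _extract_attr_from_title
-- ===== SOURCE A (Python) =====
-- def _extract_attr_from_title(title: str):
--     attributes = dict()
--     for t in title.strip().split(';'):
--         t = t.strip().split(' ')
--         if t[0] in attributes:
--             raise OSError(f'Duplicate entry in title ({title})')
--         attributes[t[0]] = t[1:]
--     return attributes
-- ===== SOURCE B (Python) =====
-- def _extract_attr_from_title(title: str):
--     parts = [p.strip().split(' ') for p in title.strip().split(';')]
--     ks = sorted(t[0] for t in parts)
--     if any(a == b for a, b in zip(ks, ks[1:])):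
--         raise OSError(f'Duplicate entry in title ({title})')
--     return {t[0]: t[1:] for t in parts}
-- ===== Notes on version B (the rewrite author's own statement) =====
-- stated objective: alternative
-- what changed: B detects duplicate keys by sorting the key list and scanning adjacent sorted neighbours for equality (sort-then-scan), then builds the dict at once by comprehension, instead of A's single incremental loop that grows a dict and tests membership before each insertion. Pre_ excludes titles with a duplicate attribute key, on which both programs raise the identical OSError.
import Mathlib
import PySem

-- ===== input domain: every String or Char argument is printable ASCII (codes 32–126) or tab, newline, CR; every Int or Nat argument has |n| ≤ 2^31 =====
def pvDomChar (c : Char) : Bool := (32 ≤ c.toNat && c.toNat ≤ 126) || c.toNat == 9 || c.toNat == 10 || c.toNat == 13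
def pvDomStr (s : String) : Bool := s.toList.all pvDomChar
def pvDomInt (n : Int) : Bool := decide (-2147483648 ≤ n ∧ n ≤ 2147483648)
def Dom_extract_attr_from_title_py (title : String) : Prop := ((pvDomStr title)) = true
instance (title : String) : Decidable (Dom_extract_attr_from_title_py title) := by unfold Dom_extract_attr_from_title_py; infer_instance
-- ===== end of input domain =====

-- B replaces A's incremental dict-with-membership-check loop by a sort-then-scan duplicate
-- check on the key list (adjacent equal neighbours after sorting), then builds the dict at
-- once by comprehension; a genuinely different strategy of similar cost.

-- s.split(sep) for a nonempty literal sep (exact: split? is none only for sep = "")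
def pvSplit (s sep : String) : List String := (PySem.Str.split? s sep).getD []

-- ===== PORT A =====
-- one iteration of A's loop; none = the raised OSError, threaded through the fold
def pvAStep (st : Option (PySem.Dict String (List String))) (p : String) :
    Option (PySem.Dict String (List String)) :=
  match st with
  | none => none
  | some attributes =>
    let t := pvSplit (PySem.Str.strip p) " "
    let k := PySem.List.pyGetD t 0 ""          -- t[0]; split always returns a nonempty list
    if attributes.contains k then none          -- raise OSError
    else some (attributes.insert k (PySem.List.slice t (some 1) none))

def extract_attr_from_title_py (title : String) : List (String × List String) :=
  (((pvSplit (PySem.Str.strip title) ";").foldl pvAStep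
      (some PySem.Dict.empty)).getD PySem.Dict.empty).items

-- ===== PORT B =====
def extract_attr_from_title_py_alt (title : String) : List (String × List String) :=
  let parts := (pvSplit (PySem.Str.strip title) ";").map (fun p => pvSplit (PySem.Str.strip p) " ")
  let ks := PySem.List.sorted (parts.map (fun t => PySem.List.pyGetD t 0 "")) (fun x => x) false
  if (ks.zip (PySem.List.slice ks (some 1) none)).any (fun ab => ab.1 == ab.2) then []   -- raise OSError
  else (PySem.Dict.ofList (parts.map (fun t =>
      (PySem.List.pyGetD t 0 "", PySem.List.slice t (some 1) none)))).items

-- ===== PRECONDITION & SPEC =====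
-- the attribute key of one ';'-separated piece: p.strip().split(' ')[0]
def pvPieceKey (p : String) : String :=
  PySem.List.pyGetD (pvSplit (PySem.Str.strip p) " ") 0 ""

-- Pre_ excludes titles with a duplicate attribute key: there A raises OSError (B raises the same).
def Pre_extract_attr_from_title_py (title : String) : Prop :=
  ((pvSplit (PySem.Str.strip title) ";").map pvPieceKey).Nodup
instance (title : String) : Decidable (Pre_extract_attr_from_title_py title) := by
  unfold Pre_extract_attr_from_title_py; infer_instance

def pvWitness_extract_attr_from_title_py : String := "bbox 1 2 3 4; baseline 0 -1"

def Spec_extract_attr_from_title_py (title : String) (out : List (String × List String)) : Prop :=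
  out = extract_attr_from_title_py_alt title
instance (title : String) (out : List (String × List String)) :
    Decidable (Spec_extract_attr_from_title_py title out) := by
  unfold Spec_extract_attr_from_title_py; infer_instance

-- ===== CLAIM (what is proved, stated in full; the proofs are below) =====
def Claim_equal_extract_attr_from_title_py : Prop :=
  ∀ (title : String), Dom_extract_attr_from_title_py title →
    Pre_extract_attr_from_title_py title →
    Spec_extract_attr_from_title_py title (extract_attr_from_title_py title)

-- ===== LEMMAS AND PROOFS =====

-- the values half of one piece: p.strip().split(' ')[1:]
def pvPieceVal (p : String) : List String :=
  PySem.List.slice (pvSplit (PySem.Str.strip p) " ") (some 1) none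

-- A's loop never hits the raise branch while its keys stay fresh, and then it is the raw insert fold.
theorem pvAloop (ps : List String) (d : PySem.Dict String (List String))
    (h : (d.keys ++ ps.map pvPieceKey).Nodup) :
    ps.foldl pvAStep (some d) =
      some (ps.foldl (fun d p => d.insert (pvPieceKey p) (pvPieceVal p)) d) := by
  induction ps generalizing d with
  | nil => rfl
  | cons p ps ih =>
    rw [List.map_cons] at h
    have hmem : pvPieceKey p ∉ d.keys := by
      rcases List.nodup_append.mp h with ⟨-, -, hdisj⟩
      intro hk
      exact hdisj _ hk _ (by simp) rfl
    have hcont : d.contains (pvPieceKey p) = false := by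
      rw [PySem.Dict.contains_eq_decide_mem_keys]; simpa using hmem
    have hstep : pvAStep (some d) p = some (d.insert (pvPieceKey p) (pvPieceVal p)) := by
      show (if d.contains (pvPieceKey p) then none
            else some (d.insert (pvPieceKey p) (pvPieceVal p))) = _
      rw [hcont, if_neg Bool.false_ne_true]
    rw [List.foldl_cons, hstep, List.foldl_cons]
    apply ih
    rw [PySem.Dict.keys_insert_of_not_contains _ _ hcont]
    rw [List.append_assoc]
    exact h

-- an insert fold from the empty dict over pairs with distinct keys lists exactly those pairs
theorem pvInsertFold (pairs : List (String × List String))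
    (hnd : (pairs.map Prod.fst).Nodup) :
    (List.foldl (fun (acc : PySem.Dict String (List String)) p => acc.insert p.1 p.2)
      PySem.Dict.empty pairs).items = pairs := by
  have h := PySem.Dict.items_foldl_insert_fresh pairs (fun p => p.1) (fun p => p.2)
    PySem.Dict.empty (fun a _ => rfl) (by simpa using hnd)
  simpa using h

theorem pvMapFold (pieces : List String) (key : String → String) (val : String → List String)
    (hpre : (pieces.map key).Nodup) :
    (pieces.foldl (fun (d : PySem.Dict String (List String)) p => d.insert (key p) (val p))
      PySem.Dict.empty).items = pieces.map (fun p => (key p, val p)) := by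
  calc (pieces.foldl (fun (d : PySem.Dict String (List String)) p => d.insert (key p) (val p))
        PySem.Dict.empty).items
      = ((pieces.map (fun p => (key p, val p))).foldl
          (fun (acc : PySem.Dict String (List String)) q => acc.insert q.1 q.2)
          PySem.Dict.empty).items := by rw [List.foldl_map]
    _ = pieces.map (fun p => (key p, val p)) :=
        pvInsertFold _ (by simpa [List.map_map, Function.comp] using hpre)

-- a list without duplicates has no equal adjacent pair (ks zipped with ks[1:])
theorem pvAdjFalse (l : List String) (h : l.Nodup) :
    (l.zip (PySem.List.slice l (some 1) none)).any (fun ab => ab.1 == ab.2) = false := by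
  induction l with
  | nil => rfl
  | cons x xs ih =>
    cases xs with
    | nil => rfl
    | cons y ys =>
      rw [List.nodup_cons] at h
      have hxy : x ≠ y := fun e => h.1 (e ▸ List.mem_cons_self)
      have htail := ih h.2
      simp only [PySem.List.slice_from_one, List.tail_cons] at htail ⊢
      rw [List.zip_cons_cons, List.any_cons, htail]
      simp [hxy]

theorem pvA_eq (title : String) (hpre : Pre_extract_attr_from_title_py title) :
    extract_attr_from_title_py title =
      (pvSplit (PySem.Str.strip title) ";").map (fun p => (pvPieceKey p, pvPieceVal p)) := by
  unfold Pre_extract_attr_from_title_py at hpre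
  unfold extract_attr_from_title_py
  rw [pvAloop _ _ (by
    rw [show (PySem.Dict.empty : PySem.Dict String (List String)).keys = [] from rfl]
    simpa using hpre)]
  rw [Option.getD_some]
  exact pvMapFold _ _ _ hpre

theorem pvB_eq (title : String) (hpre : Pre_extract_attr_from_title_py title) :
    extract_attr_from_title_py_alt title =
      (pvSplit (PySem.Str.strip title) ";").map (fun p => (pvPieceKey p, pvPieceVal p)) := by
  unfold Pre_extract_attr_from_title_py at hpre
  unfold extract_attr_from_title_py_alt
  have hkeys : ((pvSplit (PySem.Str.strip title) ";").map
      (fun p => pvSplit (PySem.Str.strip p) " ")).map (fun t => PySem.List.pyGetD t 0 "") =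
      (pvSplit (PySem.Str.strip title) ";").map pvPieceKey := by
    simp [List.map_map, Function.comp, pvPieceKey]
  have hsnd : (PySem.List.sorted ((pvSplit (PySem.Str.strip title) ";").map pvPieceKey)
      (fun x => x) false).Nodup :=
    (PySem.List.sorted_perm _ _ _).nodup_iff.mpr hpre
  simp only [hkeys]
  rw [pvAdjFalse _ hsnd, if_neg Bool.false_ne_true]
  rw [List.map_map]
  rw [show ((fun t => ((PySem.List.pyGetD t 0 "", PySem.List.slice t (some 1) none) :
      String × List String)) ∘ fun p => pvSplit (PySem.Str.strip p) " ") =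
      fun p => (pvPieceKey p, pvPieceVal p) from by
    funext p; simp [Function.comp, pvPieceKey, pvPieceVal]]
  rw [PySem.Dict.ofList, PySem.Dict.update, List.foldl_map]
  show (List.foldl (fun x y =>
      x.insert (pvPieceKey y, pvPieceVal y).1 (pvPieceKey y, pvPieceVal y).2)
      PySem.Dict.empty (pvSplit (PySem.Str.strip title) ";")).items = _
  dsimp only
  exact pvMapFold _ _ _ hpre

-- ===== VERDICT (by name: the statement is the Claim_ definition above) =====
theorem extract_attr_from_title_py_spec : Claim_equal_extract_attr_from_title_py := by
  intro title _ hpre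
  unfold Spec_extract_attr_from_title_py
  rw [pvA_eq title hpre, pvB_eq title hpre]
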